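-- pv_equiv track=rewrite | github.com/jacobmarch/ESM | gui.py | extract_playoff_standings
-- ===== SOURCE A (Python) =====
-- def extract_playoff_standings(playoff_text):
--     standings = []
--     lines = playoff_text.split('\n')
--     for line in lines:
--         if "Final Standings:" in line:
--             idx = lines.index(line)
--             while idx + 1 < len(lines) and lines[idx + 1].strip():
--                 standings.append(lines[idx + 1])
--                 idx += 1
--             break
--     return "\n".join(["Final Standings:"] + standings)
-- ===== SOURCE B (Python) =====
-- def extract_playoff_standings(playoff_text):
--     standings = ["Final Standings:"]
--     collecting = False
--     for line in playoff_text.split('\n'):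
--         if collecting:
--             if line.strip():
--                 standings.append(line)
--             else:
--                 break
--         elif "Final Standings:" in line:
--             collecting = True
--     return "\n".join(standings)
-- ===== Notes on version B (the rewrite author's own statement) =====
-- stated objective: simpler
-- what changed: One linear pass with a boolean collecting flag replaces the find-marker-then-lines.index-then-inner-index-while structure; no index arithmetic or repeated list lookup remains.
import Mathlib
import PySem

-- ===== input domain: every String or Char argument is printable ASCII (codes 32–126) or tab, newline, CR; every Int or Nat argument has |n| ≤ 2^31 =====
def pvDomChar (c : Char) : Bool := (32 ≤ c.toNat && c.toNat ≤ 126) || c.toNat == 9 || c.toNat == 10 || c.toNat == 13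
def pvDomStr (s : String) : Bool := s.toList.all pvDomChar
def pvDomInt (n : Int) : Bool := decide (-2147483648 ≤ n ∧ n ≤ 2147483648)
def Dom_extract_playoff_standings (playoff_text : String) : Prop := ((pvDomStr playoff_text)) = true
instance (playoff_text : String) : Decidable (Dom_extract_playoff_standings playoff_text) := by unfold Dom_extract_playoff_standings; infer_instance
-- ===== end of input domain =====

-- B replaces A's find-marker / lines.index / indexed inner while with one flagged linear pass; objective: simpler.

-- ===== PORT A =====
-- the inner 'while idx + 1 < len(lines) and lines[idx + 1].strip(): standings.append(lines[idx+1]); idx += 1'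
def pvAWhile (lines : List String) (idx : Nat) : List String :=
  if h : idx + 1 < lines.length then
    if PySem.Str.strip (lines[idx + 1]) == "" then []
    else lines[idx + 1] :: pvAWhile lines (idx + 1)
  else []
termination_by lines.length - idx

-- the 'for line in lines' loop with its break
def pvAFor (lines : List String) : List String → List String
  | [] => []
  | line :: rest =>
    if PySem.Str.isIn "Final Standings:" line then
      pvAWhile lines ((PySem.List.index? lines line).getD 0)
    else pvAFor lines rest

def extract_playoff_standings (playoff_text : String) : String :=
  let lines := (PySem.Str.split? playoff_text "\n").getD []
  let standings := pvAFor lines lines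
  PySem.Str.join "\n" ("Final Standings:" :: standings)

-- ===== PORT B =====
-- single pass with a 'collecting' flag (Source B's loop; the break ends the recursion)
def pvBLoop : Bool → List String → List String
  | _, [] => []
  | true, line :: rest =>
      if PySem.Str.strip line == "" then [] else line :: pvBLoop true rest
  | false, line :: rest =>
      if PySem.Str.isIn "Final Standings:" line then pvBLoop true rest
      else pvBLoop false rest

def extract_playoff_standings_alt (playoff_text : String) : String :=
  PySem.Str.join "\n"
    ("Final Standings:" :: pvBLoop false ((PySem.Str.split? playoff_text "\n").getD []))

-- ===== PRECONDITION & SPEC =====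
def Spec_extract_playoff_standings (playoff_text : String) (out : String) : Prop := out = extract_playoff_standings_alt playoff_text
instance (playoff_text : String) (out : String) : Decidable (Spec_extract_playoff_standings playoff_text out) := by unfold Spec_extract_playoff_standings; infer_instance

-- ===== CLAIM (what is proved, stated in full; the proofs are below) =====
def Claim_equal_extract_playoff_standings : Prop := ∀ (playoff_text : String), Dom_extract_playoff_standings playoff_text → Spec_extract_playoff_standings playoff_text (extract_playoff_standings playoff_text)

-- ===== LEMMAS AND PROOFS =====

-- A's inner while collects the maximal nonblank block after position idx
theorem pvAWhile_eq_takeWhile (lines : List String) (idx : Nat) :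
    pvAWhile lines idx
      = (lines.drop (idx + 1)).takeWhile (fun l => !(PySem.Str.strip l == "")) := by
  refine pvAWhile.induct lines
    (fun i => pvAWhile lines i
      = (lines.drop (i + 1)).takeWhile (fun l => !(PySem.Str.strip l == ""))) ?_ ?_ ?_ idx
  · intro i h hs
    rw [pvAWhile]
    simp only [h, dif_pos, if_pos hs]
    rw [List.drop_eq_getElem_cons h, List.takeWhile_cons]
    simp [hs]
  · intro i h hs ih
    rw [pvAWhile]
    simp only [h, dif_pos, if_neg hs]
    rw [List.drop_eq_getElem_cons h, List.takeWhile_cons]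
    simp only [Bool.not_eq_true] at hs
    simp only [hs, Bool.not_false, if_true, ih]
  · intro i h
    rw [pvAWhile]
    have hle : lines.length ≤ i + 1 := Nat.le_of_not_lt h
    simp [List.drop_eq_nil_of_le hle, h]

-- B's collecting phase is the same maximal nonblank block
theorem pvBLoop_true_eq_takeWhile (rest : List String) :
    pvBLoop true rest = rest.takeWhile (fun l => !(PySem.Str.strip l == "")) := by
  induction rest with
  | nil => rfl
  | cons line rest ih =>
      rw [pvBLoop, List.takeWhile_cons]
      by_cases hs : PySem.Str.strip line == ""
      · simp [hs]
      · simp [hs, ih]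

-- the two scans agree: invariant = no line of the already-passed prefix contains the marker
theorem pvScan_agree (pre rest : List String)
    (hpre : ∀ l ∈ pre, PySem.Str.isIn "Final Standings:" l = false) :
    pvAFor (pre ++ rest) rest = pvBLoop false rest := by
  induction rest generalizing pre with
  | nil => rfl
  | cons line rest ih =>
      rw [pvAFor, pvBLoop]
      by_cases hm : PySem.Str.isIn "Final Standings:" line = true
      · simp only [hm, if_true]
        have hnot : line ∉ pre := fun hmem => by
          have h2 := hpre line hmem; rw [hm] at h2; simp at h2
        have hidx : PySem.List.index? (pre ++ line :: rest) line = some pre.length :=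
          (PySem.List.index?_eq_some_iff _ _ _).mpr ⟨pre, rest, rfl, rfl, hnot⟩
        rw [hidx]
        simp only [Option.getD_some]
        rw [pvAWhile_eq_takeWhile, pvBLoop_true_eq_takeWhile]
        congr 1
        rw [show pre ++ line :: rest = (pre ++ [line]) ++ rest by simp,
            show pre.length + 1 = (pre ++ [line]).length by simp, List.drop_left]
      · rw [Bool.not_eq_true] at hm
        simp only [hm, Bool.false_eq_true, if_false]
        rw [show pre ++ line :: rest = (pre ++ [line]) ++ rest by simp]
        exact ih (pre ++ [line]) (by
          intro l hl
          rcases List.mem_append.mp hl with h1 | h1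
          · exact hpre l h1
          · rw [List.mem_singleton.mp h1]; exact hm)

-- ===== VERDICT (by name: the statement is the Claim_ definition above) =====
theorem extract_playoff_standings_spec : Claim_equal_extract_playoff_standings := by
  intro playoff_text _
  unfold Spec_extract_playoff_standings extract_playoff_standings extract_playoff_standings_alt
  have h := pvScan_agree [] ((PySem.Str.split? playoff_text "\n").getD [])
    (by intro l hl; cases hl)
  rw [List.nil_append] at h
  show PySem.Str.join "\n" ("Final Standings:" :: pvAFor _ _) = _
  rw [h]
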